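-- pv_equiv track=rewrite | github.com/usverger/problems | python/advent2024/Day09.py | locate_free_chunk_of_size
-- ===== SOURCE A (Python) =====
-- from typing import List
--
-- def locate_free_chunk_of_size(disk: List[int], start: int, end: int, size: int) -> tuple:
--     i = start
--     while i < end:
--         if not disk[i] is None:
--             i += 1
--             continue
--
--         j = i
--         while j < end and disk[j] is None:
--             j += 1
--         if j - i >= size:
--             return (i, j - i)
--         i = j
--
--     return None
-- ===== SOURCE B (Python) =====
-- def locate_free_chunk_of_size(disk, start, end, size):
--     # backward dynamic programming: run[i] = length of the None-run beginning at i (clipped to end)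
--     run = {}
--     i = end - 1
--     while i >= start:
--         run[i] = run.get(i + 1, 0) + 1 if disk[i] is None else 0
--         i -= 1
--     # forward jump scan: inspect each run start, hop over whole runs
--     i = start
--     while i < end:
--         r = run.get(i, 0)
--         if r and r >= size:
--             return (i, r)
--         i += r if r else 1
--     return None
-- ===== Notes on version B (the rewrite author's own statement) =====
-- stated objective: alternative
-- what changed: Replaces A's forward nested free-run scan by two staged passes: a backward dynamic-programming pass tabulating the None-run length starting at each index, then a forward jump scan that hops whole runs using that table.
-- outside the precondition, e.g. on locate_free_chunk_of_size([None, 0], 0, 5, 1): A returns (0, 1), B raises IndexError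
import Mathlib
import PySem

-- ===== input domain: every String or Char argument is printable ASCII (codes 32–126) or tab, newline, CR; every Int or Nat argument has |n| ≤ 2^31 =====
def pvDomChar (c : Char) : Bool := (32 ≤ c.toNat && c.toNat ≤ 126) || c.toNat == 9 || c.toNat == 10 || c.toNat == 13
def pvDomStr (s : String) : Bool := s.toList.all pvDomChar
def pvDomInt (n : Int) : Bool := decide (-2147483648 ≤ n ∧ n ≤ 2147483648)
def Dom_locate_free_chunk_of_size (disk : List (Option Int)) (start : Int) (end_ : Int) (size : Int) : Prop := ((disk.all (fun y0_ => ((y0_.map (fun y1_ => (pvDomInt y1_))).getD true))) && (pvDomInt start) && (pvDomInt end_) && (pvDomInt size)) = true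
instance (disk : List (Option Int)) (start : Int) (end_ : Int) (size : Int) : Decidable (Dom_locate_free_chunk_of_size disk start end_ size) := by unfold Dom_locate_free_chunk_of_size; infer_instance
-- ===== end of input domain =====

-- B replaces A's forward nested free-run scan by a backward DP table of run lengths plus a
-- forward jump scan over run starts (objective: alternative, same asymptotic cost).

-- ===== PORT A =====
-- inner `while j < end and disk[j] is None: j += 1` of A
def lfcInner (disk : List (Option Int)) (end_ : Int) (j : Int) : Int :=
  if h : j < end_ then
    match PySem.List.pyGet? disk j with
    | some none => lfcInner disk end_ (j + 1)
    | _ => j          -- non-None element stops the loop (IndexError lies outside Pre_)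
  else j
termination_by (end_ - j).toNat
decreasing_by omega

theorem lfcInner_ge (disk : List (Option Int)) (end_ : Int) (j : Int) :
    j ≤ lfcInner disk end_ j := by
  unfold lfcInner
  split
  · split
    · have := lfcInner_ge disk end_ (j + 1); omega
    · omega
  · omega
termination_by (end_ - j).toNat
decreasing_by omega

theorem lfcInner_step (disk : List (Option Int)) (end_ j : Int) (h : j < end_)
    (hg : PySem.List.pyGet? disk j = some none) :
    lfcInner disk end_ j = lfcInner disk end_ (j + 1) := by
  conv_lhs => rw [lfcInner]
  simp [h, hg]

-- outer `while i < end` of A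
def lfcOuter (disk : List (Option Int)) (end_ : Int) (size : Int) (i : Int) : Option (Int × Int) :=
  if h : i < end_ then
    match hg : PySem.List.pyGet? disk i with
    | some none =>
        let j := lfcInner disk end_ i
        if j - i ≥ size then some (i, j - i) else lfcOuter disk end_ size j
    | _ => lfcOuter disk end_ size (i + 1)   -- `continue` branch (IndexError lies outside Pre_)
  else none
termination_by (end_ - i).toNat
decreasing_by
  · have h1 : i + 1 ≤ lfcInner disk end_ (i + 1) := lfcInner_ge disk end_ (i + 1)
    have h2 : lfcInner disk end_ i = lfcInner disk end_ (i + 1) :=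
      lfcInner_step disk end_ i h hg
    omega
  · omega

def locate_free_chunk_of_size (disk : List (Option Int)) (start : Int) (end_ : Int) (size : Int) : Option (Int × Int) :=
  lfcOuter disk end_ size start

-- ===== PORT B =====
-- B's first (backward) pass: `while i >= start: run[i] = run.get(i+1,0)+1 if disk[i] is None else 0; i -= 1`
def lfcBuild (disk : List (Option Int)) (start : Int) (i : Int) (run : PySem.Dict Int Int) : PySem.Dict Int Int :=
  if h : i ≥ start then
    lfcBuild disk start (i - 1)
      (run.insert i (match PySem.List.pyGet? disk i with
        | some none => run.getD (i + 1) 0 + 1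
        | _ => 0))   -- non-None element gives 0 (IndexError lies outside Pre_)
  else run
termination_by (i - start + 1).toNat
decreasing_by omega

-- B's second (forward) pass: `while i < end: r = run.get(i,0); if r and r >= size: return (i,r); i += r if r else 1`
def lfcJump (end_ : Int) (size : Int) (run : PySem.Dict Int Int) (i : Int) : Option (Int × Int) :=
  if h : i < end_ then
    let r := run.getD i 0
    if r ≠ 0 ∧ r ≥ size then some (i, r)
    else lfcJump end_ size run (i + (if r > 0 then r else 1))
  else none
termination_by (end_ - i).toNat
decreasing_by split <;> omega

def locate_free_chunk_of_size_alt (disk : List (Option Int)) (start : Int) (end_ : Int) (size : Int) : Option (Int × Int) :=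
  lfcJump end_ size (lfcBuild disk start (end_ - 1) PySem.Dict.empty) start

-- ===== PRECONDITION & SPEC =====
-- Pre_ keeps the natural domain where every index in [start, end) is a valid position: outside it
-- A raises IndexError except when an accidental early return fires before its scan walks off the
-- list, while B's backward table pass touches every index of the range and raises there.
def Pre_locate_free_chunk_of_size (disk : List (Option Int)) (start : Int) (end_ : Int) (size : Int) : Prop :=
  start < end_ → (-(disk.length : Int) ≤ start ∧ end_ ≤ (disk.length : Int))
instance (disk : List (Option Int)) (start : Int) (end_ : Int) (size : Int) : Decidable (Pre_locate_free_chunk_of_size disk start end_ size) := by unfold Pre_locate_free_chunk_of_size; infer_instance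

def pvWitness_locate_free_chunk_of_size : List (Option Int) × Int × Int × Int :=
  ([some 1, none, none, some 2, none], 0, 5, 2)

def Spec_locate_free_chunk_of_size (disk : List (Option Int)) (start : Int) (end_ : Int) (size : Int) (out : Option (Int × Int)) : Prop := out = locate_free_chunk_of_size_alt disk start end_ size
instance (disk : List (Option Int)) (start : Int) (end_ : Int) (size : Int) (out : Option (Int × Int)) : Decidable (Spec_locate_free_chunk_of_size disk start end_ size out) := by unfold Spec_locate_free_chunk_of_size; infer_instance

-- ===== CLAIM =====
def Claim_equal_locate_free_chunk_of_size : Prop := ∀ (disk : List (Option Int)) (start : Int) (end_ : Int) (size : Int), Dom_locate_free_chunk_of_size disk start end_ size → Pre_locate_free_chunk_of_size disk start end_ size → Spec_locate_free_chunk_of_size disk start end_ size (locate_free_chunk_of_size disk start end_ size)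

-- ===== LEMMAS AND PROOFS =====

-- the intended meaning of B's table entry: length of the None-run starting at m, clipped at end_
def lfcRl (disk : List (Option Int)) (end_ : Int) (m : Int) : Int :=
  if h : m < end_ then
    match PySem.List.pyGet? disk m with
    | some none => lfcRl disk end_ (m + 1) + 1
    | _ => 0
  else 0
termination_by (end_ - m).toNat
decreasing_by omega

theorem lfcRl_nonneg (disk : List (Option Int)) (end_ m : Int) : 0 ≤ lfcRl disk end_ m := by
  unfold lfcRl
  split
  · split
    · have := lfcRl_nonneg disk end_ (m + 1); omega
    · omega
  · omega
termination_by (end_ - m).toNat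
decreasing_by omega

theorem lfcRl_stop (disk : List (Option Int)) (end_ m : Int) (h : ¬ m < end_) :
    lfcRl disk end_ m = 0 := by
  unfold lfcRl; simp [h]

theorem lfcInner_eq_rl (disk : List (Option Int)) (end_ m : Int) :
    lfcInner disk end_ m = m + lfcRl disk end_ m := by
  unfold lfcInner lfcRl
  split
  · rcases hg : PySem.List.pyGet? disk m with _ | v
    · simp
    · rcases v with _ | x
      · simp only
        have := lfcInner_eq_rl disk end_ (m + 1); omega
      · simp
  · simp
termination_by (end_ - m).toNat
decreasing_by omega

-- validity of every index in [lo, end_)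
def LfcValid (disk : List (Option Int)) (end_ lo : Int) : Prop :=
  ∀ m : Int, lo ≤ m → m < end_ → (PySem.List.pyGet? disk m).isSome

theorem lfcValid_mono (disk : List (Option Int)) (end_ lo lo' : Int) (h : lo ≤ lo')
    (hv : LfcValid disk end_ lo) : LfcValid disk end_ lo' := by
  intro m h1 h2; exact hv m (by omega) h2

-- the backward pass tabulates exactly lfcRl on [start, end_)
theorem lfcBuild_spec (disk : List (Option Int)) (end_ start i : Int) (run : PySem.Dict Int Int)
    (hi : i < end_)
    (hrun : ∀ m : Int, i < m → run.getD m 0 = lfcRl disk end_ m) :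
    ∀ m : Int, i < m ∨ start ≤ m → (lfcBuild disk start i run).getD m 0 = lfcRl disk end_ m := by
  unfold lfcBuild
  split
  · intro m hm
    apply lfcBuild_spec disk end_ start (i - 1) _ (by omega)
    · intro m' hm'
      rw [PySem.Dict.getD_insert]
      split
      · subst m'
        rcases hg : PySem.List.pyGet? disk i with _ | v
        · rw [lfcRl]; simp [hi, hg]
        · rcases v with _ | x
          · rw [hrun (i + 1) (by omega)]
            conv_rhs => rw [lfcRl]
            simp [hi, hg]
          · rw [lfcRl]; simp [hi, hg]
      · exact hrun m' (by omega)
    · omega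
  · intro m hm
    rcases hm with hm | hm
    · exact hrun m hm
    · exact hrun m (by omega)
termination_by (i - start + 1).toNat
decreasing_by omega

-- the jump scan equals A's outer loop
theorem lfcJump_eq (disk : List (Option Int)) (end_ size start : Int)
    (run : PySem.Dict Int Int)
    (hD : ∀ m : Int, start ≤ m → m < end_ → run.getD m 0 = lfcRl disk end_ m)
    (i : Int) (hs : start ≤ i) (hv : LfcValid disk end_ i) :
    lfcJump end_ size run i = lfcOuter disk end_ size i := by
  rw [lfcJump, lfcOuter]
  split
  · rename_i h
    have hr : run.getD i 0 = lfcRl disk end_ i := hD i hs h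
    have hsome : (PySem.List.pyGet? disk i).isSome := hv i (le_refl i) h
    rcases hg : PySem.List.pyGet? disk i with _ | v
    · simp [hg] at hsome
    · rcases v with _ | x
      · -- free at i: table entry is the full run length
        have hrl : lfcRl disk end_ i = lfcRl disk end_ (i + 1) + 1 := by
          conv_lhs => rw [lfcRl]
          simp [h, hg]
        have hpos : 0 < lfcRl disk end_ i := by
          have := lfcRl_nonneg disk end_ (i + 1); omega
        have hje : lfcInner disk end_ i = i + lfcRl disk end_ i := lfcInner_eq_rl disk end_ i
        simp only [hr]
        rw [hje]
        have harith : i + lfcRl disk end_ i - i = lfcRl disk end_ i := by ring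
        rw [harith]
        by_cases hc : lfcRl disk end_ i ≥ size
        · rw [if_pos ⟨by omega, hc⟩, if_pos hc]
        · rw [if_neg (fun hcc => hc hcc.2), if_neg hc, if_pos hpos]
          exact lfcJump_eq disk end_ size start run hD (i + lfcRl disk end_ i)
            (by omega) (lfcValid_mono disk end_ i _ (by omega) hv)
      · -- occupied at i: table entry is 0, both step by one
        have hz : lfcRl disk end_ i = 0 := by
          conv_lhs => rw [lfcRl]
          simp [h, hg]
        simp only [hr, hz]
        rw [if_neg (by omega)]
        simp only [if_neg (by omega : ¬ (0:Int) > 0)]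
        exact lfcJump_eq disk end_ size start run hD (i + 1)
          (by omega) (lfcValid_mono disk end_ i _ (by omega) hv)
  · rfl
termination_by (end_ - i).toNat
decreasing_by all_goals omega

-- ===== VERDICT =====
theorem locate_free_chunk_of_size_spec : Claim_equal_locate_free_chunk_of_size := by
  intro disk start end_ size _ hpre
  unfold Spec_locate_free_chunk_of_size locate_free_chunk_of_size locate_free_chunk_of_size_alt
  have hv : LfcValid disk end_ start := by
    intro m h1 h2
    have hb := hpre (by omega)
    have hin : PySem.Raise.InRange disk.length m := by
      unfold PySem.Raise.InRange; omega
    rcases hx : PySem.List.pyGet? disk m with _ | v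
    · exact absurd ((PySem.List.pyGet?_eq_none_iff (xs := disk) (i := m)).mp hx)
        (by simpa using hin)
    · simp
  have hD : ∀ m : Int, start ≤ m → m < end_ →
      (lfcBuild disk start (end_ - 1) PySem.Dict.empty).getD m 0 = lfcRl disk end_ m := by
    intro m h1 h2
    exact lfcBuild_spec disk end_ start (end_ - 1) PySem.Dict.empty (by omega)
      (fun m' hm' => by
        rw [PySem.Dict.getD_empty, lfcRl_stop disk end_ m' (by omega)])
      m (Or.inr h1)
  exact (lfcJump_eq disk end_ size start _ hD start (le_refl start) hv).symm
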